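-- pv_equiv track=rewrite | github.com/yijung0325/ML_DS | HTLin_ML_Foundations/hw2_17_18.py | get_dichotomies
-- ===== SOURCE A (Python) =====
-- def get_dichotomies(DATA_SIZE):
--     list_dichotomies = []
--     # positive ray
--     for ii in range(DATA_SIZE):
--         dichotomy = [-1]*ii
--         dichotomy.extend([1]*(DATA_SIZE-ii))
--         list_dichotomies.append(dichotomy)
--     # negative ray
--     for ii in range(DATA_SIZE):
--         dichotomy = [1]*ii
--         dichotomy.extend([-1]*(DATA_SIZE-ii))
--         list_dichotomies.append(dichotomy)
--     return list_dichotomies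
-- ===== SOURCE B (Python) =====
-- def get_dichotomies(DATA_SIZE):
--     # Incremental single-row algorithm: keep one working row, emit a snapshot,
--     # then flip one entry per step.  Starting from the all-ones row, flipping
--     # positions 0..n-1 to -1 walks through all positive-ray rows and ends at
--     # the all-minus-ones row, from which flipping back to 1 walks through all
--     # negative-ray rows.
--     out = []
--     row = [1] * DATA_SIZE
--     for sign in (-1, 1):
--         for i in range(DATA_SIZE):
--             out.append(row[:])
--             row[i] = sign
--     return out
-- ===== Notes on version B (the rewrite author's own statement) =====
-- stated objective: alternative
-- what changed: B replaces the two independent replicate-and-extend constructions with a single incremental walk: one mutable working row starts as all ones, each step snapshots it and flips one entry (to -1 through the first half, back to 1 through the second), so each dichotomy is derived from the previous one rather than built from scratch.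
import Mathlib
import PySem

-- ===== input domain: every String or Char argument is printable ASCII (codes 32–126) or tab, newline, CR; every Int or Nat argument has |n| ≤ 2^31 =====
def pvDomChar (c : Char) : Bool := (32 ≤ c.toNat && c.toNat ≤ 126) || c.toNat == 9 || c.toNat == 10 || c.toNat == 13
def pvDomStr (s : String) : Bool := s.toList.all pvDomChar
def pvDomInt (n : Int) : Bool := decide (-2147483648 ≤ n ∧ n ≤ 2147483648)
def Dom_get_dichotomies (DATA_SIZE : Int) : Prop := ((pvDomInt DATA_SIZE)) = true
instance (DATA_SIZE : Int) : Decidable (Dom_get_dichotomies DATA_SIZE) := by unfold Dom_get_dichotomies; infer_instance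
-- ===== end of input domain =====

-- B replaces A's two independent replicate-and-extend loops by a single incremental walk
-- of one mutable row (snapshot, then flip one entry per step); equal return values proved.

-- ===== PORT A =====
def get_dichotomies (DATA_SIZE : Int) : List (List Int) :=
  -- list_dichotomies = []; for ii in range(DATA_SIZE): append [-1]*ii + [1]*(DATA_SIZE-ii)
  let l1 := (PySem.List.pyRange 0 DATA_SIZE 1).foldl (fun acc ii =>
    acc ++ [List.replicate ii.toNat (-1) ++ List.replicate (DATA_SIZE - ii).toNat 1]) []
  -- for ii in range(DATA_SIZE): append [1]*ii + [-1]*(DATA_SIZE-ii)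
  (PySem.List.pyRange 0 DATA_SIZE 1).foldl (fun acc ii =>
    acc ++ [List.replicate ii.toNat 1 ++ List.replicate (DATA_SIZE - ii).toNat (-1)]) l1

-- ===== PORT B =====
-- state = (out, row); inner loop body: out.append(row[:]); row[i] = sign.
-- 'row[i] = sign' is List.set at i.toNat: exact here, since i ∈ range(DATA_SIZE)
-- and row always has DATA_SIZE elements, so the assignment is always in range.
def get_dichotomies_alt (DATA_SIZE : Int) : List (List Int) :=
  (([(-1 : Int), 1].foldl (fun st sign =>
      (PySem.List.pyRange 0 DATA_SIZE 1).foldl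
        (fun st i => (st.1 ++ [st.2], st.2.set i.toNat sign)) st)
    ([], List.replicate DATA_SIZE.toNat 1))).1

-- ===== PRECONDITION & SPEC =====
def Spec_get_dichotomies (DATA_SIZE : Int) (out : List (List Int)) : Prop := out = get_dichotomies_alt DATA_SIZE
instance (DATA_SIZE : Int) (out : List (List Int)) : Decidable (Spec_get_dichotomies DATA_SIZE out) := by unfold Spec_get_dichotomies; infer_instance

-- ===== CLAIM (what is proved, stated in full; the proofs are below) =====
def Claim_equal_get_dichotomies : Prop := ∀ (DATA_SIZE : Int), Dom_get_dichotomies DATA_SIZE → Spec_get_dichotomies DATA_SIZE (get_dichotomies DATA_SIZE)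

-- ===== LEMMAS AND PROOFS =====

-- A's append-in-a-loop is a map.
theorem foldl_push_eq_map {a b : Type} (f : a -> b) (l : List a) (init : List b) :
    l.foldl (fun acc x => acc ++ [f x]) init = init ++ l.map f := by
  induction l generalizing init with
  | nil => simp
  | cons h t ih => simp [List.foldl, ih]

-- flipping entry k of a row that is s on [0,k) and c on [k,n) extends the s-prefix
theorem set_boundary (s c : Int) (n k : Nat) (hk : k < n) :
    (List.replicate k s ++ List.replicate (n - k) c).set k s
      = List.replicate (k + 1) s ++ List.replicate (n - (k + 1)) c := by
  have hnk : n - k = (n - (k + 1)) + 1 := by omega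
  rw [hnk, List.replicate_succ, List.set_append_right _ _ (by simp),
      List.length_replicate, Nat.sub_self, List.set_cons_zero,
      List.replicate_succ' (n := k)]
  simp

-- invariant of B's inner loop: after k steps, out holds the first k rows and the
-- working row is s on [0,k) and c on [k,n).
theorem inner_fold (s c : Int) (n : Nat) : ∀ (k : Nat), k ≤ n → ∀ (out : List (List Int)),
    (List.range k).foldl (fun st (i : Nat) => (st.1 ++ [st.2], st.2.set i s))
        (out, List.replicate n c)
    = (out ++ (List.range k).map (fun i => List.replicate i s ++ List.replicate (n - i) c),
       List.replicate k s ++ List.replicate (n - k) c) := by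
  intro k
  induction k with
  | zero => intro _ out; simp
  | succ k ih =>
    intro hk out
    rw [List.range_succ, List.foldl_append, ih (by omega) out]
    simp only [List.foldl_cons, List.foldl_nil, List.map_append, List.map_cons, List.map_nil,
      List.append_assoc]
    exact congrArg _ (set_boundary s c n k (by omega))

-- B's inner loop over the Int range, as a fold over a Nat range
theorem inner_fold_pyRange (s : Int) (n : Int) (st : List (List Int) × List Int) :
    (PySem.List.pyRange 0 n 1).foldl
        (fun st i => (st.1 ++ [st.2], st.2.set i.toNat s)) st
    = (List.range n.toNat).foldl
        (fun st (i : Nat) => (st.1 ++ [st.2], st.2.set i s)) st := by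
  rw [PySem.List.pyRange_one, List.foldl_map]
  simp

-- ===== VERDICT (by name: the statement is the Claim_ definition above) =====

theorem get_dichotomies_spec : Claim_equal_get_dichotomies := by
  intro n _
  unfold Spec_get_dichotomies get_dichotomies get_dichotomies_alt
  simp only [foldl_push_eq_map, List.nil_append, List.foldl_cons, List.foldl_nil,
    inner_fold_pyRange]
  rw [inner_fold (-1) 1 n.toNat n.toNat (le_refl _) []]
  simp only [List.nil_append, Nat.sub_self, List.replicate_zero, List.append_nil]
  rw [inner_fold 1 (-1) n.toNat n.toNat (le_refl _)]
  rw [PySem.List.pyRange_one, List.map_map, List.map_map]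
  simp only [Int.sub_zero]
  congr 1 <;>
  · apply List.map_congr_left
    intro k hk
    have hk' : k < n.toNat := List.mem_range.mp hk
    have h2 : (n - (k : Int)).toNat = n.toNat - k := by omega
    simp [Function.comp, h2]
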